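-- pv_equiv track=rewrite | github.com/devitocodes/devito | devito/tools/algorithms.py | build_dependence_lists
-- ===== SOURCE A (Python) =====
-- from collections import OrderedDict
--
-- def build_dependence_lists(elements):
--     """
--     Given an iterable of dependences, return the dependence lists as a
--     mapper suitable for graph-like algorithms. A dependence is an iterable of
--     elements ``[a, b, c, ...]``, meaning that ``a`` preceeds ``b`` and ``c``,
--     ``b`` preceeds ``c``, and so on.
--     """
--     mapper = OrderedDict()
--     for element in elements:
--         for idx, i0 in enumerate(element):
--             v = mapper.setdefault(i0, set())
--             for i1 in element[idx + 1:]: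
--                 v.add(i1)
--     return mapper
-- ===== SOURCE B (Python) =====
-- from collections import OrderedDict
--
-- def build_dependence_lists(elements):
--     # One forward pass per dependence list, maintaining the predecessors seen
--     # so far: each new element is added to every predecessor's successor set,
--     # so no slicing and no inner successor scan per position is needed.
--     mapper = OrderedDict()
--     for element in elements:
--         preds = []
--         for x in element:
--             for p in preds:
--                 mapper[p].add(x)
--             mapper.setdefault(x, set())
--             if x not in preds:
--                 preds.append(x)
--     return mapper
-- ===== Notes on version B (the rewrite author's own statement) =====
-- stated objective: alternative
-- what changed: B replaces A's per-position successor scan over the slice element[idx+1:] by a single forward pass per dependence list that keeps a deduplicated predecessor list and adds each new element to every predecessor's set, so no slices are built.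
import Mathlib
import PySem

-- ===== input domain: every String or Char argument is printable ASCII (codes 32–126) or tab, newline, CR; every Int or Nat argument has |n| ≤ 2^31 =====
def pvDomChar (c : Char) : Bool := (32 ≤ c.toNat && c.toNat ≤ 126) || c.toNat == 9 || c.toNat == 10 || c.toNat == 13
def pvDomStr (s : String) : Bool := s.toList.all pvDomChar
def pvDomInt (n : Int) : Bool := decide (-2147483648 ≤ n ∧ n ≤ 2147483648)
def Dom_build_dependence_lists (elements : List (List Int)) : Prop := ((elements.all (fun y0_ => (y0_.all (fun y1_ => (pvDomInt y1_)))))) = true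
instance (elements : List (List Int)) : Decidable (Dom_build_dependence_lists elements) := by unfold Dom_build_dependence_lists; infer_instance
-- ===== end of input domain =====

-- B replaces A's per-position scan of the slice element[idx+1:] by a single forward pass per
-- dependence list that keeps a deduplicated predecessor list; same return value (neither mutates its input).

-- ===== PORT A =====
-- mapper : OrderedDict of Int -> set  →  PySem.Dict Int (PySem.Set Int); returned as its items list.
def build_dependence_lists (elements : List (List Int)) : List (Int × List Int) :=
  (elements.foldl (fun d element =>
      (PySem.List.enumerate element).foldl (fun d ix =>
          -- v = mapper.setdefault(i0, set()); v.add(i1) mutates mapper[i0] in place,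
          -- ported as modify on key ix.2 (which is present after the setdefault).
          let d1 := d.setdefault ix.2 PySem.Set.empty
          (PySem.List.slice element (some (ix.1 + 1)) none).foldl
            (fun d i1 => d.modify ix.2 PySem.Set.empty (fun v => PySem.Set.add v i1)) d1)
        d)
    PySem.Dict.empty).items

-- ===== PORT B =====
-- mapper[p].add(x): p is always a key here (it was setdefault'ed at an earlier position of the
-- same element), so Dict.modify with default ∅ is exact.
def build_dependence_lists_alt (elements : List (List Int)) : List (Int × List Int) :=
  (elements.foldl (fun d element =>
      (element.foldl (fun (st : PySem.Dict Int (PySem.Set Int) × List Int) x =>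
          let d1 := st.2.foldl (fun d p => d.modify p PySem.Set.empty (fun v => PySem.Set.add v x)) st.1
          let d2 := d1.setdefault x PySem.Set.empty
          (d2, if st.2.contains x then st.2 else st.2 ++ [x]))
        (d, ([] : List Int))).1)
    PySem.Dict.empty).items

-- ===== PRECONDITION & SPEC =====
def Spec_build_dependence_lists (elements : List (List Int)) (out : List (Int × List Int)) : Prop := out = build_dependence_lists_alt elements
instance (elements : List (List Int)) (out : List (Int × List Int)) : Decidable (Spec_build_dependence_lists elements out) := by unfold Spec_build_dependence_lists; infer_instance

-- ===== CLAIM (what is proved, stated in full; the proofs are below) =====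
def Claim_equal_build_dependence_lists : Prop := ∀ (elements : List (List Int)), Dom_build_dependence_lists elements → Spec_build_dependence_lists elements (build_dependence_lists elements)

-- ===== LEMMAS AND PROOFS =====

def pvAddS (d : PySem.Dict Int (List Int)) (k x : Int) : PySem.Dict Int (List Int) :=
  d.modify k PySem.Set.empty (fun v => PySem.Set.add v x)

-- items of insert on a present key
theorem pv_items_insert_present (d : PySem.Dict Int (List Int)) (k : Int) (v : List Int)
    (h : d.contains k = true) :
    (d.insert k v).items = d.items.map (fun p => if p.1 == k then (k, v) else p) := by
  simp [PySem.Dict.insert, h]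

theorem pv_keys_insert_present (d : PySem.Dict Int (List Int)) (k : Int) (v : List Int)
    (h : d.contains k = true) :
    (d.insert k v).keys = d.keys := by
  simp only [PySem.Dict.keys, pv_items_insert_present d k v h, List.map_map]
  apply List.map_congr_left
  intro p _
  simp only [Function.comp]
  split
  · next hb => simp at hb ⊢; omega
  · rfl

theorem pv_ins_ins_comm (d : PySem.Dict Int (List Int)) (k1 k2 : Int) (v1 v2 : List Int)
    (h1 : d.contains k1 = true) (h2 : d.contains k2 = true) (hne : k1 ≠ k2) :
    (d.insert k1 v1).insert k2 v2 = (d.insert k2 v2).insert k1 v1 := by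
  have c12 : (d.insert k1 v1).contains k2 = true := by
    rw [PySem.Dict.contains_insert]; simp [h2]
  have c21 : (d.insert k2 v2).contains k1 = true := by
    rw [PySem.Dict.contains_insert]; simp [h1]
  apply PySem.Dict.ext
  rw [pv_items_insert_present _ _ _ c12, pv_items_insert_present _ _ _ c21,
      pv_items_insert_present _ _ _ h1, pv_items_insert_present _ _ _ h2,
      List.map_map, List.map_map]
  apply List.map_congr_left
  intro p _
  simp only [Function.comp]
  by_cases e1 : p.1 = k1
  · simp [e1, hne, Ne.symm hne]
  · by_cases e2 : p.1 = k2 <;> simp [e1, e2, hne, Ne.symm hne]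

theorem pv_addS_comm (d : PySem.Dict Int (List Int)) (k1 k2 x1 x2 : Int)
    (h1 : d.contains k1 = true) (h2 : d.contains k2 = true) (hne : k1 ≠ k2) :
    pvAddS (pvAddS d k1 x1) k2 x2 = pvAddS (pvAddS d k2 x2) k1 x1 := by
  show ((d.insert k1 _).insert k2 (PySem.Set.add ((d.insert k1 (PySem.Set.add (d.getD k1 PySem.Set.empty) x1)).getD k2 PySem.Set.empty) x2)) = _
  rw [PySem.Dict.getD_insert_of_ne d _ _ (Ne.symm hne)]
  show _ = ((d.insert k2 _).insert k1 (PySem.Set.add ((d.insert k2 (PySem.Set.add (d.getD k2 PySem.Set.empty) x2)).getD k1 PySem.Set.empty) x1))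
  rw [PySem.Dict.getD_insert_of_ne d _ _ hne]
  exact pv_ins_ins_comm d k1 k2 _ _ h1 h2 hne

def pvSetd (d : PySem.Dict Int (List Int)) (x : Int) : PySem.Dict Int (List Int) :=
  d.setdefault x PySem.Set.empty

theorem pv_contains_addS (d : PySem.Dict Int (List Int)) (k x k' : Int) :
    (pvAddS d k x).contains k' = ((k' == k) || d.contains k') :=
  PySem.Dict.contains_modify d k k' PySem.Set.empty _

theorem pv_setd_addS_comm (d : PySem.Dict Int (List Int)) (k x y : Int)
    (h : d.contains k = true) :
    pvSetd (pvAddS d k x) y = pvAddS (pvSetd d y) k x := by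
  by_cases hy : d.contains y = true
  · rw [pvSetd, PySem.Dict.setdefault_of_contains _ _ (by rw [pv_contains_addS]; simp [hy]),
        pvSetd, PySem.Dict.setdefault_of_contains _ _ hy]
  · have hy' : d.contains y = false := by simpa using hy
    have hky : y ≠ k := by rintro rfl; rw [h] at hy'; cases hy'
    have c1 : (pvAddS d k x).contains y = false := by
      rw [pv_contains_addS]; simp [hy', hky]
    have c2 : (pvSetd d y).contains k = true := by
      rw [pvSetd, PySem.Dict.contains_setdefault]; simp [h]
    apply PySem.Dict.ext
    rw [pvSetd, PySem.Dict.setdefault_of_not_contains _ _ c1]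
    have hGD : (pvSetd d y).getD k PySem.Set.empty = d.getD k PySem.Set.empty := by
      rw [PySem.Dict.getD, PySem.Dict.getD, pvSetd, PySem.Dict.get?_setdefault_of_ne _ _ (Ne.symm hky)]
    show ((pvAddS d k x).insert y PySem.Set.empty).items
        = ((pvSetd d y).insert k (PySem.Set.add ((pvSetd d y).getD k PySem.Set.empty) x)).items
    rw [hGD]
    have hAy : (pvAddS d k x).contains y = false := c1
    rw [PySem.Dict.insert]
    simp only [hAy, Bool.false_eq_true, if_neg (by simp [hAy] : ¬ (pvAddS d k x).contains y = true)]
    rw [pv_items_insert_present _ _ _ c2]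
    show (d.insert k (PySem.Set.add (d.getD k PySem.Set.empty) x)).items ++ [(y, PySem.Set.empty)]
        = ((pvSetd d y).items.map (fun p => if p.1 == k then (k, PySem.Set.add (d.getD k PySem.Set.empty) x) else p))
    rw [pv_items_insert_present _ _ _ h]
    have : (pvSetd d y).items = d.items ++ [(y, PySem.Set.empty)] := by
      rw [pvSetd, PySem.Dict.setdefault_of_not_contains _ _ hy', PySem.Dict.insert]
      simp [hy']
    rw [this, List.map_append]
    simp [hky]

theorem pv_map_find (l : List (Int × List Int)) (k : Int) (v : List Int)
    (hnd : (l.map Prod.fst).Nodup) (h : l.find? (fun p => p.1 == k) = some (k, v)) :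
    l.map (fun p => if p.1 == k then (k, v) else p) = l := by
  induction l with
  | nil => simp at h
  | cons p rest ih =>
    simp only [List.map_cons, List.map] at hnd
    by_cases hb : p.1 = k
    · rw [List.find?_cons_of_pos (by simp [hb])] at h
      have hp : p = (k, v) := by simpa using h
      subst hp
      have htail : List.map (fun q => if (q.1 == k) = true then (k, v) else q) rest = rest := by
        have hcg : ∀ q ∈ rest, (if (q.1 == k) = true then ((k, v) : Int × List Int) else q) = id q := by
          intro q hq
          have : q.1 ≠ k := by
            intro e
            have hm : q.1 ∈ List.map Prod.fst rest := List.mem_map_of_mem (f := Prod.fst) hq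
            rw [e] at hm
            exact (List.nodup_cons.mp hnd).1 hm
          simp [this]
        rw [List.map_congr_left hcg, List.map_id]
      simp only [List.map_cons, htail]
      simp
    · rw [List.find?_cons_of_neg (by simp [hb])] at h
      simp only [List.map_cons]
      rw [ih (List.nodup_cons.mp hnd).2 h]
      simp [hb]

theorem pv_insert_getD_self (d : PySem.Dict Int (List Int)) (k : Int)
    (hk : d.keys.Nodup) (h : d.contains k = true) :
    d.insert k (d.getD k PySem.Set.empty) = d := by
  have hs : (d.items.find? (fun p => p.1 == k)).isSome := by
    rw [List.find?_isSome]
    simpa [PySem.Dict.contains, List.any_eq_true] using h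
  obtain ⟨p0, hp0⟩ := Option.isSome_iff_exists.mp hs
  have hk0 : p0.1 = k := by simpa using List.find?_some hp0
  have hgd : d.getD k PySem.Set.empty = p0.2 := by
    rw [PySem.Dict.getD, PySem.Dict.get?, hp0]; rfl
  apply PySem.Dict.ext
  rw [pv_items_insert_present _ _ _ h, hgd]
  exact pv_map_find d.items k p0.2 hk (by rw [hp0]; rw [← hk0])

theorem pv_addS_noop (d : PySem.Dict Int (List Int)) (k a : Int)
    (hk : d.keys.Nodup) (h : d.contains k = true) (ha : a ∈ d.getD k PySem.Set.empty) :
    pvAddS d k a = d := by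
  have : PySem.Set.add (d.getD k PySem.Set.empty) a = d.getD k PySem.Set.empty := by
    simp only [PySem.Set.add]
    rw [if_pos]
    exact List.elem_eq_true_of_mem ha
  show d.insert k (PySem.Set.add (d.getD k PySem.Set.empty) a) = d
  rw [this]
  exact pv_insert_getD_self d k hk h

def pvAddAll (d : PySem.Dict Int (List Int)) (k : Int) (l : List Int) : PySem.Dict Int (List Int) :=
  l.foldl (fun d i => pvAddS d k i) d
def pvAddTo (d : PySem.Dict Int (List Int)) (ps : List Int) (x : Int) : PySem.Dict Int (List Int) :=
  ps.foldl (fun d p => pvAddS d p x) d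
def pvAddAllPs (d : PySem.Dict Int (List Int)) (ps : List Int) (l : List Int) : PySem.Dict Int (List Int) :=
  ps.foldl (fun d p => pvAddAll d p l) d
def pvInv (d : PySem.Dict Int (List Int)) (ps : List Int) : Prop :=
  ∀ p ∈ ps, d.contains p = true

theorem pvAddAll_cons (d : PySem.Dict Int (List Int)) (k x : Int) (l : List Int) :
    pvAddAll d k (x :: l) = pvAddAll (pvAddS d k x) k l := rfl
theorem pvAddTo_cons (d : PySem.Dict Int (List Int)) (p x : Int) (ps : List Int) :
    pvAddTo d (p :: ps) x = pvAddTo (pvAddS d p x) ps x := rfl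
theorem pvAddAllPs_cons (d : PySem.Dict Int (List Int)) (p : Int) (ps l : List Int) :
    pvAddAllPs d (p :: ps) l = pvAddAllPs (pvAddAll d p l) ps l := rfl

theorem pv_contains_addAll_mono (l : List Int) (d : PySem.Dict Int (List Int)) (k k' : Int)
    (h : d.contains k' = true) : (pvAddAll d k l).contains k' = true := by
  induction l generalizing d with
  | nil => exact h
  | cons a l ih => rw [pvAddAll_cons]; exact ih _ (by rw [pv_contains_addS]; simp [h])

theorem pv_contains_addTo_mono (ps : List Int) (d : PySem.Dict Int (List Int)) (x k' : Int)
    (h : d.contains k' = true) : (pvAddTo d ps x).contains k' = true := by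
  induction ps generalizing d with
  | nil => exact h
  | cons p ps ih => rw [pvAddTo_cons]; exact ih _ (by rw [pv_contains_addS]; simp [h])

theorem pv_contains_addAllPs_mono (ps : List Int) (d : PySem.Dict Int (List Int)) (l : List Int) (k' : Int)
    (h : d.contains k' = true) : (pvAddAllPs d ps l).contains k' = true := by
  induction ps generalizing d with
  | nil => exact h
  | cons p ps ih => rw [pvAddAllPs_cons]; exact ih _ (pv_contains_addAll_mono _ _ _ _ h)

theorem pv_contains_setd_mono (d : PySem.Dict Int (List Int)) (y k' : Int)
    (h : d.contains k' = true) : (pvSetd d y).contains k' = true := by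
  rw [pvSetd, PySem.Dict.contains_setdefault]; simp [h]

theorem pv_keys_addS (d : PySem.Dict Int (List Int)) (k x : Int) (h : d.contains k = true) :
    (pvAddS d k x).keys = d.keys := by
  rw [pvAddS, PySem.Dict.keys_modify, pv_keys_insert_present _ _ _ h]

theorem pv_keys_addAll (l : List Int) (d : PySem.Dict Int (List Int)) (k : Int)
    (h : d.contains k = true) : (pvAddAll d k l).keys = d.keys := by
  induction l generalizing d with
  | nil => rfl
  | cons a l ih =>
    rw [pvAddAll_cons, ih _ (by rw [pv_contains_addS]; simp [h]), pv_keys_addS _ _ _ h]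

theorem pv_keys_addTo (ps : List Int) (d : PySem.Dict Int (List Int)) (x : Int)
    (hinv : pvInv d ps) : (pvAddTo d ps x).keys = d.keys := by
  induction ps generalizing d with
  | nil => rfl
  | cons p ps ih =>
    have hp := hinv p (by simp)
    rw [pvAddTo_cons, ih _ (fun q hq => by rw [pv_contains_addS]; simp [hinv q (by simp [hq])]),
        pv_keys_addS _ _ _ hp]

theorem pv_keys_addAllPs (ps : List Int) (d : PySem.Dict Int (List Int)) (l : List Int)
    (hinv : pvInv d ps) : (pvAddAllPs d ps l).keys = d.keys := by
  induction ps generalizing d with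
  | nil => rfl
  | cons p ps ih =>
    have hp := hinv p (by simp)
    rw [pvAddAllPs_cons, ih _ (fun q hq => pv_contains_addAll_mono _ _ _ _ (hinv q (by simp [hq]))),
        pv_keys_addAll _ _ _ hp]

theorem pv_swap (l : List Int) (d : PySem.Dict Int (List Int)) (p q x : Int)
    (hne : q ≠ p) (hq : d.contains q = true) (hp : d.contains p = true) :
    pvAddAll (pvAddS d q x) p l = pvAddS (pvAddAll d p l) q x := by
  induction l generalizing d with
  | nil => rfl
  | cons a l ih =>
    rw [pvAddAll_cons, pv_addS_comm d q p x a hq hp hne, pvAddAll_cons]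
    exact ih _ (by rw [pv_contains_addS]; simp [hq]) (by rw [pv_contains_addS]; simp [hp])

theorem pv_cat (ps : List Int) (d : PySem.Dict Int (List Int)) (p x : Int) (l : List Int)
    (hnm : p ∉ ps) (hp : d.contains p = true) (hinv : pvInv d ps) :
    pvAddAll (pvAddTo d ps x) p l = pvAddTo (pvAddAll d p l) ps x := by
  induction ps generalizing d with
  | nil => rfl
  | cons q ps ih =>
    have hq := hinv q (by simp)
    have hnq : q ≠ p := by intro e; exact hnm (by simp [e])
    rw [pvAddTo_cons, ih _ (by simp at hnm; exact hnm.2)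
          (by rw [pv_contains_addS]; simp [hp])
          (fun r hr => by rw [pv_contains_addS]; simp [hinv r (by simp [hr])]),
        pv_swap l d p q x hnq hq hp, pvAddTo_cons]

theorem pv_setd_addAll_comm (l : List Int) (d : PySem.Dict Int (List Int)) (k y : Int)
    (h : d.contains k = true) :
    pvSetd (pvAddAll d k l) y = pvAddAll (pvSetd d y) k l := by
  induction l generalizing d with
  | nil => rfl
  | cons a l ih =>
    rw [pvAddAll_cons, ih _ (by rw [pv_contains_addS]; simp [h]),
        pv_setd_addS_comm d k a y h, pvAddAll_cons]

theorem pv_setd_addAllPs_comm (ps : List Int) (d : PySem.Dict Int (List Int)) (l : List Int) (y : Int)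
    (hinv : pvInv d ps) :
    pvSetd (pvAddAllPs d ps l) y = pvAddAllPs (pvSetd d y) ps l := by
  induction ps generalizing d with
  | nil => rfl
  | cons p ps ih =>
    have hp := hinv p (by simp)
    rw [pvAddAllPs_cons, ih _ (fun q hq => pv_contains_addAll_mono _ _ _ _ (hinv q (by simp [hq]))),
        pv_setd_addAll_comm l d p y hp, pvAddAllPs_cons]

theorem pv_int (ps : List Int) (d : PySem.Dict Int (List Int)) (x : Int) (l : List Int)
    (hnd : ps.Nodup) (hinv : pvInv d ps) :
    pvAddAllPs (pvAddTo d ps x) ps l = pvAddAllPs d ps (x :: l) := by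
  induction ps generalizing d with
  | nil => rfl
  | cons p ps ih =>
    have hp := hinv p (by simp)
    have hnm : p ∉ ps := (List.nodup_cons.mp hnd).1
    rw [pvAddTo_cons, pvAddAllPs_cons,
        pv_cat ps (pvAddS d p x) p x l hnm
          (by rw [pv_contains_addS]; simp [hp])
          (fun q hq => by rw [pv_contains_addS]; simp [hinv q (by simp [hq])]),
        ih _ (List.nodup_cons.mp hnd).2
          (fun q hq => pv_contains_addAll_mono _ _ _ _
            (by rw [pv_contains_addS]; simp [hinv q (by simp [hq])])),
        pvAddAllPs_cons, pvAddAll_cons]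

theorem pv_mem_getD_addS_mono (d : PySem.Dict Int (List Int)) (q b x a : Int)
    (h : a ∈ d.getD x PySem.Set.empty) : a ∈ (pvAddS d q b).getD x PySem.Set.empty := by
  by_cases e : x = q
  · subst e
    rw [pvAddS, PySem.Dict.getD_modify_self]
    rw [PySem.Set.mem_add]
    exact Or.inl h
  · rw [pvAddS, PySem.Dict.getD_modify_of_ne _ _ _ e]
    exact h

theorem pv_mem_getD_addAll_mono (l : List Int) (d : PySem.Dict Int (List Int)) (q x a : Int)
    (h : a ∈ d.getD x PySem.Set.empty) : a ∈ (pvAddAll d q l).getD x PySem.Set.empty := by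
  induction l generalizing d with
  | nil => exact h
  | cons b l ih => exact ih _ (pv_mem_getD_addS_mono d q b x a h)

theorem pv_mem_getD_addAllPs_mono (ps : List Int) (d : PySem.Dict Int (List Int)) (l : List Int) (x a : Int)
    (h : a ∈ d.getD x PySem.Set.empty) : a ∈ (pvAddAllPs d ps l).getD x PySem.Set.empty := by
  induction ps generalizing d with
  | nil => exact h
  | cons p ps ih => exact ih _ (pv_mem_getD_addAll_mono l d p x a h)

theorem pv_mem_getD_addAll_self (l : List Int) (d : PySem.Dict Int (List Int)) (x a : Int)
    (h : a ∈ l) : a ∈ (pvAddAll d x l).getD x PySem.Set.empty := by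
  induction l generalizing d with
  | nil => simp at h
  | cons b l ih =>
    rw [pvAddAll_cons]
    rcases List.mem_cons.mp h with e | hm
    · subst e
      apply pv_mem_getD_addAll_mono
      rw [pvAddS, PySem.Dict.getD_modify_self, PySem.Set.mem_add]
      exact Or.inr rfl
    · exact ih _ hm

theorem pv_mem_getD_addAllPs_self (ps : List Int) (d : PySem.Dict Int (List Int)) (l : List Int) (x a : Int)
    (hx : x ∈ ps) (ha : a ∈ l) : a ∈ (pvAddAllPs d ps l).getD x PySem.Set.empty := by
  induction ps generalizing d with
  | nil => simp at hx
  | cons p ps ih =>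
    rw [pvAddAllPs_cons]
    rcases List.mem_cons.mp hx with e | hm
    · subst e
      exact pv_mem_getD_addAllPs_mono ps _ l x a (pv_mem_getD_addAll_self l d x a ha)
    · exact ih _ hm

theorem pv_addAll_noop (l : List Int) (d : PySem.Dict Int (List Int)) (k : Int)
    (hk : d.keys.Nodup) (hc : d.contains k = true)
    (h : ∀ a ∈ l, a ∈ d.getD k PySem.Set.empty) : pvAddAll d k l = d := by
  induction l with
  | nil => rfl
  | cons a l ih =>
    rw [pvAddAll_cons, pv_addS_noop d k a hk hc (h a (by simp))]
    exact ih (fun b hb => h b (by simp [hb]))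

def pvAfold : PySem.Dict Int (List Int) → List Int → PySem.Dict Int (List Int)
  | d, [] => d
  | d, x :: xs => pvAfold (pvAddAll (pvSetd d x) x xs) xs

def pvBfold : PySem.Dict Int (List Int) → List Int → List Int → PySem.Dict Int (List Int)
  | d, _, [] => d
  | d, ps, x :: xs =>
      pvBfold (pvSetd (pvAddTo d ps x) x) (if ps.contains x then ps else ps ++ [x]) xs

theorem pvAddAllPs_nil_right (ps : List Int) (d : PySem.Dict Int (List Int)) :
    pvAddAllPs d ps [] = d := by
  induction ps generalizing d with
  | nil => rfl
  | cons p ps ih => rw [pvAddAllPs_cons]; exact ih _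

theorem pvAddAllPs_append_single (ps : List Int) (d : PySem.Dict Int (List Int)) (x : Int) (l : List Int) :
    pvAddAllPs d (ps ++ [x]) l = pvAddAll (pvAddAllPs d ps l) x l := by
  simp [pvAddAllPs, List.foldl_append]

theorem pv_keys_nodup_setd (d : PySem.Dict Int (List Int)) (x : Int)
    (h : d.keys.Nodup) : (pvSetd d x).keys.Nodup := by
  rw [pvSetd, PySem.Dict.keys_setdefault]
  split
  · exact h
  · next hc =>
    have : x ∉ d.keys := by
      intro hm
      rw [PySem.Dict.contains_eq_decide_mem_keys] at hc
      simp [hm] at hc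
    simp [List.nodup_append, h]
    exact fun a ha e => this (e ▸ ha)

theorem pv_contains_setd_self (d : PySem.Dict Int (List Int)) (x : Int) :
    (pvSetd d x).contains x = true := by
  rw [pvSetd, PySem.Dict.contains_setdefault]; simp

theorem pv_main (xs : List Int) (d : PySem.Dict Int (List Int)) (ps : List Int)
    (hnd : ps.Nodup) (hk : d.keys.Nodup) (hinv : pvInv d ps) :
    pvBfold d ps xs = pvAfold (pvAddAllPs d ps xs) xs := by
  induction xs generalizing d ps with
  | nil => rw [pvAddAllPs_nil_right]; rfl
  | cons x xs ih =>
    show pvBfold (pvSetd (pvAddTo d ps x) x) (if ps.contains x then ps else ps ++ [x]) xs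
        = pvAfold (pvAddAll (pvSetd (pvAddAllPs d ps (x :: xs)) x) x xs) xs
    have hinvTo : pvInv (pvAddTo d ps x) ps :=
      fun q hq => pv_contains_addTo_mono _ _ _ _ (hinv q hq)
    by_cases hx : ps.contains x = true
    · have hxm : x ∈ ps := by simpa using hx
      rw [if_pos hx]
      have hcx : (pvAddTo d ps x).contains x = true :=
        pv_contains_addTo_mono _ _ _ _ (hinv x hxm)
      rw [show pvSetd (pvAddTo d ps x) x = pvAddTo d ps x from
            PySem.Dict.setdefault_of_contains _ _ hcx]
      have hkTo : (pvAddTo d ps x).keys.Nodup := by rw [pv_keys_addTo _ _ _ hinv]; exact hk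
      rw [ih _ _ hnd hkTo hinvTo, pv_int ps d x xs hnd hinv]
      have hcR : (pvAddAllPs d ps (x :: xs)).contains x = true :=
        pv_contains_addAllPs_mono _ _ _ _ (hinv x hxm)
      rw [show pvSetd (pvAddAllPs d ps (x :: xs)) x = pvAddAllPs d ps (x :: xs) from
            PySem.Dict.setdefault_of_contains _ _ hcR]
      have hkR : (pvAddAllPs d ps (x :: xs)).keys.Nodup := by
        rw [pv_keys_addAllPs _ _ _ hinv]; exact hk
      rw [pv_addAll_noop xs _ x hkR hcR
            (fun a ha => pv_mem_getD_addAllPs_self ps d (x :: xs) x a hxm (by simp [ha]))]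
    · have hxm : x ∉ ps := by
        intro hm; exact hx (by simpa using hm)
      rw [if_neg hx]
      have hinv1 : pvInv (pvSetd (pvAddTo d ps x) x) (ps ++ [x]) := by
        intro q hq
        rcases List.mem_append.mp hq with hq | hq
        · exact pv_contains_setd_mono _ _ _ (hinvTo q hq)
        · simp at hq; subst hq; exact pv_contains_setd_self _ _
      have hk1 : (pvSetd (pvAddTo d ps x) x).keys.Nodup := by
        apply pv_keys_nodup_setd
        rw [pv_keys_addTo _ _ _ hinv]; exact hk
      rw [ih _ _ (by simp [List.nodup_append, hnd]; exact fun a ha e => hxm (e ▸ ha)) hk1 hinv1,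
          pvAddAllPs_append_single,
          ← pv_setd_addAllPs_comm ps (pvAddTo d ps x) xs x hinvTo,
          pv_int ps d x xs hnd hinv]

theorem pvA_gen (xs full : List Int) (k : Nat) (d : PySem.Dict Int (List Int))
    (h : full.drop k = xs) :
    (PySem.List.enumerate xs (k : Int)).foldl (fun d ix =>
        let d1 := d.setdefault ix.2 PySem.Set.empty
        (PySem.List.slice full (some (ix.1 + 1)) none).foldl
          (fun d i1 => d.modify ix.2 PySem.Set.empty (fun v => PySem.Set.add v i1)) d1)
      d = pvAfold d xs := by
  induction xs generalizing k d with
  | nil => rw [PySem.List.enumerate_nil]; rfl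
  | cons x xs ih =>
    rw [PySem.List.enumerate_cons, List.foldl_cons]
    have hdrop : full.drop (k + 1) = xs := by
      rw [← List.drop_drop (i := 1) (j := k) (l := full), h, List.drop_one, List.tail_cons]
    have hsl : PySem.List.slice full (some ((k : Int) + 1)) none = xs := by
      have : ((k : Int) + 1) = ((k + 1 : Nat) : Int) := by push_cast; ring
      rw [this, PySem.List.slice_from_natCast, hdrop]
    show (PySem.List.enumerate xs ((k : Int) + 1)).foldl _
        ((PySem.List.slice full (some ((k : Int) + 1)) none).foldl _ (d.setdefault x PySem.Set.empty)) = _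
    rw [hsl]
    have : ((k : Int) + 1) = ((k + 1 : Nat) : Int) := by push_cast; ring
    rw [this]
    exact ih (k + 1) _ hdrop

theorem pvB_gen (xs : List Int) (d : PySem.Dict Int (List Int)) (ps : List Int) :
    ((xs.foldl (fun (st : PySem.Dict Int (List Int) × List Int) x =>
        let d1 := st.2.foldl (fun d p => d.modify p PySem.Set.empty (fun v => PySem.Set.add v x)) st.1
        let d2 := d1.setdefault x PySem.Set.empty
        (d2, if st.2.contains x then st.2 else st.2 ++ [x]))
      (d, ps)).1) = pvBfold d ps xs := by
  induction xs generalizing d ps with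
  | nil => rfl
  | cons x xs ih =>
    rw [List.foldl_cons]
    exact ih _ _

theorem pv_keys_nodup_afold (xs : List Int) (d : PySem.Dict Int (List Int))
    (h : d.keys.Nodup) : (pvAfold d xs).keys.Nodup := by
  induction xs generalizing d with
  | nil => exact h
  | cons x xs ih =>
    show (pvAfold (pvAddAll (pvSetd d x) x xs) xs).keys.Nodup
    apply ih
    rw [pv_keys_addAll _ _ _ (pv_contains_setd_self d x)]
    exact pv_keys_nodup_setd d x h

theorem pv_top (els : List (List Int)) (d : PySem.Dict Int (List Int)) (h : d.keys.Nodup) :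
    els.foldl (fun d element =>
      (PySem.List.enumerate element).foldl (fun d ix =>
          let d1 := d.setdefault ix.2 PySem.Set.empty
          (PySem.List.slice element (some (ix.1 + 1)) none).foldl
            (fun d i1 => d.modify ix.2 PySem.Set.empty (fun v => PySem.Set.add v i1)) d1)
        d) d
    = els.foldl (fun d element =>
      (element.foldl (fun (st : PySem.Dict Int (List Int) × List Int) x =>
          let d1 := st.2.foldl (fun d p => d.modify p PySem.Set.empty (fun v => PySem.Set.add v x)) st.1
          let d2 := d1.setdefault x PySem.Set.empty
          (d2, if st.2.contains x then st.2 else st.2 ++ [x]))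
        (d, ([] : List Int))).1) d := by
  induction els generalizing d with
  | nil => rfl
  | cons e els ih =>
    rw [List.foldl_cons, List.foldl_cons]
    have hA := pvA_gen e e 0 d rfl
    rw [show ((0 : Nat) : Int) = (0 : Int) by simp] at hA
    rw [hA, pvB_gen e d [], pv_main e d [] (by simp) h (by intro p hp; simp at hp)]
    rw [show pvAddAllPs d [] e = d from rfl]
    exact ih _ (pv_keys_nodup_afold e d h)

-- ===== VERDICT (by name: the statement is the Claim_ definition above) =====
theorem build_dependence_lists_spec : Claim_equal_build_dependence_lists := by
  intro elements _
  unfold Spec_build_dependence_lists build_dependence_lists build_dependence_lists_alt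
  rw [pv_top elements PySem.Dict.empty (by simp [PySem.Dict.keys, PySem.Dict.empty])]
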